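-- pv_equiv track=rewrite | github.com/pallenikhil/cryptography | crypto-7.py | decrypt_substitution_cipher
-- ===== SOURCE A (Python) =====
-- def decrypt_substitution_cipher(ciphertext, key):
--     decrypted_text = ""
--     for char in ciphertext:
--         if char.isalpha():
--             decrypted_text += key[ord(char.upper()) - ord('A')]
--         else:
--             decrypted_text += char
--     return decrypted_text
-- ===== SOURCE B (Python) =====
-- def decrypt_substitution_cipher(ciphertext, key):
--     out = list(ciphertext)
--     for i in range(min(26, len(key))):
--         u, l = chr(65 + i), chr(97 + i)
--         out = [key[i] if c == u or c == l else o for c, o in zip(ciphertext, out)]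
--     return "".join(out)
-- ===== Notes on version B (the rewrite author's own statement) =====
-- stated objective: alternative
-- what changed: B inverts the traversal: instead of one scan over the ciphertext branching per character, it makes one staged pass per key letter (26 passes), each rebuilding the output list by substituting just that letter's occurrences (zip against the original text), then joins once.
import Mathlib
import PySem

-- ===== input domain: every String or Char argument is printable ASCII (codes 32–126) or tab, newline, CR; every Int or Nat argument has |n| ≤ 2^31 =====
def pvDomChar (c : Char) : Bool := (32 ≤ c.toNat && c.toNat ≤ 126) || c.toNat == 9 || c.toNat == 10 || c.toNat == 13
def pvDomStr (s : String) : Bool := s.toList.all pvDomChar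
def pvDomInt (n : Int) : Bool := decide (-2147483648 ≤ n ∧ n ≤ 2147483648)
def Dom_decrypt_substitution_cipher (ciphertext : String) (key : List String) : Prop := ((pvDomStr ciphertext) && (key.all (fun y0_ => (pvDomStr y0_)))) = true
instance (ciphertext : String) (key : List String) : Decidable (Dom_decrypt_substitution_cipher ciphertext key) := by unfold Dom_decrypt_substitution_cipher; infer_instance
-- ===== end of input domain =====

-- B inverts the traversal: one staged pass per key letter (substituting that letter's
-- occurrences against the original text), then a single join — instead of A's
-- per-character scan with arithmetic key indexing.

-- ===== PORT A =====
-- literal transliteration: string accumulator ported as a List Char accumulator;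
-- key[ord(char.upper()) - ord('A')] via PySem.List.pyGet? (the '.getD ""' arm is the
-- IndexError case, excluded by Pre_).  Chars.isalpha/upperChar are exact on the ASCII Dom.
def decrypt_substitution_cipher (ciphertext : String) (key : List String) : String :=
  String.ofList
    (ciphertext.toList.foldl
      (fun acc c =>
        if PySem.Chars.isalpha c then
          acc ++ ((PySem.List.pyGet? key (((PySem.Chars.upperChar c).toNat : Int) - 65)).getD "").toList
        else
          acc ++ [c])
      [])

-- ===== PORT B =====
-- out = list(ciphertext); for i in range(min(26, len(key))): one zip-rebuild pass
-- substituting chr(65+i)/chr(97+i); finally "".join(out).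
def decrypt_substitution_cipher_alt (ciphertext : String) (key : List String) : String :=
  PySem.Str.join ""
    ((PySem.List.pyRange 0 (min 26 (key.length : Int)) 1).foldl
      (fun out i =>
        (ciphertext.toList.zip out).map (fun co =>
          if co.1 = Char.ofNat (65 + i).toNat ∨ co.1 = Char.ofNat (97 + i).toNat
          then (PySem.List.pyGet? key i).getD "" else co.2))
      (ciphertext.toList.map (fun c => String.ofList [c])))

-- ===== PRECONDITION & SPEC =====
-- Pre_ excludes exactly the inputs on which A raises IndexError: an alphabetic
-- character whose alphabet index reaches past the end of key.
def Pre_decrypt_substitution_cipher (ciphertext : String) (key : List String) : Prop :=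
  (ciphertext.toList.all (fun c =>
    !PySem.Chars.isalpha c ||
    decide ((if PySem.Chars.islower c then c.toNat - 32 else c.toNat) - 65 < key.length))) = true
instance (ciphertext : String) (key : List String) : Decidable (Pre_decrypt_substitution_cipher ciphertext key) := by unfold Pre_decrypt_substitution_cipher; infer_instance

def pvWitness_decrypt_substitution_cipher : String × List String := ("aB b!", ["x", "y"])

def Spec_decrypt_substitution_cipher (ciphertext : String) (key : List String) (out : String) : Prop := out = decrypt_substitution_cipher_alt ciphertext key
instance (ciphertext : String) (key : List String) (out : String) : Decidable (Spec_decrypt_substitution_cipher ciphertext key out) := by unfold Spec_decrypt_substitution_cipher; infer_instance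

-- ===== CLAIM (what is proved, stated in full; the proofs are below) =====
def Claim_equal_decrypt_substitution_cipher : Prop := ∀ (ciphertext : String) (key : List String), Dom_decrypt_substitution_cipher ciphertext key → Pre_decrypt_substitution_cipher ciphertext key → Spec_decrypt_substitution_cipher ciphertext key (decrypt_substitution_cipher ciphertext key)

-- ===== LEMMAS AND PROOFS =====

-- what B's staged passes have produced after the first m letters have been handled
def pvG (key : List String) (m : Nat) (c : Char) : String :=
  if 65 ≤ c.toNat ∧ c.toNat ≤ 90 ∧ c.toNat - 65 < m then key.getD (c.toNat - 65) ""
  else if 97 ≤ c.toNat ∧ c.toNat ≤ 122 ∧ c.toNat - 97 < m then key.getD (c.toNat - 97) ""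
  else String.ofList [c]

theorem pvValidChar (n : Nat) (h : n ≤ 122) : n.isValidChar := by
  unfold Nat.isValidChar; left; omega

theorem pvCharEq (c : Char) (n : Nat) (h : n ≤ 122) : (c = Char.ofNat n) ↔ c.toNat = n := by
  constructor
  · rintro rfl; simp [Char.toNat_ofNat, pvValidChar n h]
  · rintro h'; rw [← Char.ofNat_toNat c, h']

theorem pvZipMap {α β γ : Type} (l : List α) (f : α → β) (h : α × β → γ) :
    (l.zip (l.map f)).map h = l.map (fun c => h (c, f c)) := by
  induction l with
  | nil => rfl
  | cons x t ih => simp [ih]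

-- one staged pass advances pvG by one letter
theorem pvStep (key : List String) (ct : List Char) (i : Nat) (h26 : i < 26) :
    (ct.zip (ct.map (pvG key i))).map (fun co =>
      if co.1 = Char.ofNat (65 + (i : Int)).toNat ∨ co.1 = Char.ofNat (97 + (i : Int)).toNat
      then (PySem.List.pyGet? key (i : Int)).getD "" else co.2)
    = ct.map (pvG key (i + 1)) := by
  rw [pvZipMap]
  refine List.map_congr_left (fun c _ => ?_)
  have hU : (65 + (i : Int)).toNat = 65 + i := by omega
  have hL : (97 + (i : Int)).toNat = 97 + i := by omega
  simp only [hU, hL, PySem.List.pyGet?_natCast,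
    pvCharEq c (65 + i) (by omega), pvCharEq c (97 + i) (by omega)]
  have hget : (key[i]?).getD "" = key.getD i "" := by rw [List.getD]
  unfold pvG
  by_cases h1 : c.toNat = 65 + i
  · rw [if_pos (Or.inl h1), if_pos (by omega),
      show c.toNat - 65 = i from by omega, hget]
  · by_cases h2 : c.toNat = 97 + i
    · rw [if_pos (Or.inr h2), if_neg (by omega), if_pos (by omega),
        show c.toNat - 97 = i from by omega, hget]
    · rw [if_neg (by tauto)]
      split_ifs <;> first | rfl | omega

-- the whole fold of B
theorem pvFold (key : List String) (ct : List Char) (n : Nat) (hn : n ≤ min 26 key.length) :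
    (PySem.List.pyRange 0 (n : Int) 1).foldl
      (fun out i =>
        (ct.zip out).map (fun co =>
          if co.1 = Char.ofNat (65 + i).toNat ∨ co.1 = Char.ofNat (97 + i).toNat
          then (PySem.List.pyGet? key i).getD "" else co.2))
      (ct.map (fun c => String.ofList [c]))
    = ct.map (pvG key n) := by
  induction n with
  | zero =>
    rw [PySem.List.pyRange_one_eq_nil (by norm_num), List.foldl_nil]
    refine List.map_congr_left (fun c _ => ?_)
    unfold pvG
    split_ifs <;> first | rfl | omega
  | succ m ih =>
    rw [show ((m + 1 : Nat) : Int) = (m : Int) + 1 from by push_cast; ring,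
      PySem.List.pyRange_one_succ_right (by positivity), List.foldl_append,
      ih (by omega), List.foldl_cons, List.foldl_nil,
      pvStep key ct m (by omega)]

theorem pvIsupper (c : Char) : PySem.Chars.isupper c = true ↔ 65 ≤ c.toNat ∧ c.toNat ≤ 90 := by
  simp only [PySem.Chars.isupper, Bool.and_eq_true, decide_eq_true_eq, Char.le_def,
    UInt32.le_iff_toNat_le]
  exact Iff.rfl

theorem pvIslower (c : Char) : PySem.Chars.islower c = true ↔ 97 ≤ c.toNat ∧ c.toNat ≤ 122 := by
  simp only [PySem.Chars.islower, Bool.and_eq_true, decide_eq_true_eq, Char.le_def,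
    UInt32.le_iff_toNat_le]
  exact Iff.rfl

theorem pvJoinNil (parts : List (List Char)) : PySem.Chars.join [] parts = parts.flatten := by
  induction parts with
  | nil => rfl
  | cons x l ih =>
    cases l with
    | nil => simp [PySem.Chars.join, List.intercalate]
    | cons y t =>
      simp only [PySem.Chars.join, List.intercalate, List.intersperse] at *
      simp only [List.flatten_cons, List.nil_append] at *
      rw [← ih]

-- one character of the ciphertext: A's branch equals pvG at the full letter count
theorem pvChar (key : List String) (c : Char)
    (hc : PySem.Chars.isalpha c = true →
      (if PySem.Chars.islower c then c.toNat - 32 else c.toNat) - 65 < key.length) :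
    (if PySem.Chars.isalpha c then
       ((PySem.List.pyGet? key (((PySem.Chars.upperChar c).toNat : Int) - 65)).getD "").toList
     else [c])
    = (pvG key (min 26 key.length) c).toList := by
  unfold pvG
  by_cases hup : PySem.Chars.isupper c = true
  · have hb := (pvIsupper c).mp hup
    have hlow : PySem.Chars.islower c = false := by
      cases hl : PySem.Chars.islower c with
      | false => rfl
      | true => have := (pvIslower c).mp hl; omega
    have halpha : PySem.Chars.isalpha c = true := by
      simp [PySem.Chars.isalpha, hup]
    have hupc : PySem.Chars.upperChar c = c := by
      simp [PySem.Chars.upperChar, hlow]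
    have hidx : c.toNat - 65 < key.length := by
      have := hc halpha; rw [hlow] at this; simpa using this
    rw [if_pos halpha, hupc,
        show ((c.toNat : Int) - 65) = ((c.toNat - 65 : Nat) : Int) from by omega,
        PySem.List.pyGet?_natCast,
        if_pos ⟨hb.1, hb.2, by omega⟩, List.getD,
        List.getElem?_eq_getElem hidx]
  · by_cases hl : PySem.Chars.islower c = true
    · have hb := (pvIslower c).mp hl
      have halpha : PySem.Chars.isalpha c = true := by
        simp [PySem.Chars.isalpha, hl]
      have hupc : PySem.Chars.upperChar c = Char.ofNat (c.toNat - 32) := by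
        simp [PySem.Chars.upperChar, hl]
      have hupn : (PySem.Chars.upperChar c).toNat = c.toNat - 32 := by
        rw [hupc, Char.toNat_ofNat, if_pos (pvValidChar _ (by omega))]
      have hidx : c.toNat - 97 < key.length := by
        have := hc halpha; rw [hl] at this; simp at this; omega
      rw [if_pos halpha, hupn,
          show (((c.toNat - 32 : Nat) : Int) - 65) = ((c.toNat - 97 : Nat) : Int) from by omega,
          PySem.List.pyGet?_natCast,
          if_neg (by omega),
          if_pos ⟨hb.1, hb.2, by omega⟩, List.getD,
          List.getElem?_eq_getElem hidx]
    · have hbu : ¬ (65 ≤ c.toNat ∧ c.toNat ≤ 90) := fun h => hup ((pvIsupper c).mpr h)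
      have hbl : ¬ (97 ≤ c.toNat ∧ c.toNat ≤ 122) := fun h => hl ((pvIslower c).mpr h)
      have halpha : PySem.Chars.isalpha c = false := by
        simp only [PySem.Chars.isalpha, Bool.or_eq_false_iff]
        constructor
        · cases h : PySem.Chars.isupper c with
          | false => rfl
          | true => exact absurd h hup
        · cases h : PySem.Chars.islower c with
          | false => rfl
          | true => exact absurd h hl
      rw [if_neg (by simp [halpha]), if_neg (by tauto), if_neg (by tauto)]
      simp

-- ===== VERDICT (by name: the statement is the Claim_ definition above) =====
theorem decrypt_substitution_cipher_spec : Claim_equal_decrypt_substitution_cipher := by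
  intro ct key hdom hpre
  unfold Spec_decrypt_substitution_cipher decrypt_substitution_cipher
    decrypt_substitution_cipher_alt
  rw [show (fun (acc : List Char) (c : Char) =>
        if PySem.Chars.isalpha c then
          acc ++ ((PySem.List.pyGet? key (((PySem.Chars.upperChar c).toNat : Int) - 65)).getD "").toList
        else acc ++ [c])
      = (fun (acc : List Char) (c : Char) => acc ++
          (if PySem.Chars.isalpha c then
            ((PySem.List.pyGet? key (((PySem.Chars.upperChar c).toNat : Int) - 65)).getD "").toList
          else [c])) from by funext acc c; split <;> rfl,
    PySem.List.foldl_append_eq_flatMap]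
  rw [show (min 26 (key.length : Int)) = ((min 26 key.length : Nat) : Int) from by push_cast; rfl,
    pvFold key ct.toList (min 26 key.length) (le_refl _)]
  show String.ofList _ = PySem.Str.join "" _
  rw [PySem.Str.join, show ("" : String).toList = [] from rfl, List.map_map, pvJoinNil,
      ← List.flatMap_def]
  refine congrArg String.ofList ?_
  rw [List.nil_append]
  unfold Pre_decrypt_substitution_cipher at hpre
  simp only [List.all_eq_true, Bool.or_eq_true, Bool.not_eq_true', decide_eq_true_eq] at hpre
  have hpre' : ∀ c ∈ ct.toList, PySem.Chars.isalpha c = true →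
      (if PySem.Chars.islower c then c.toNat - 32 else c.toNat) - 65 < key.length := by
    intro c hc ha
    rcases hpre c hc with h | h
    · rw [ha] at h; cases h
    · exact h
  clear hpre hdom
  rw [List.flatMap_def]
  refine congrArg List.flatten ?_
  exact List.map_congr_left (fun c hc => pvChar key c (hpre' c hc))
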